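-- pv_equiv track=rewrite | github.com/wadiee/911-deal | app/normalizer.py | normalize_seller_type
-- ===== SOURCE A (Python) =====
-- from typing import Optional
--
-- def normalize_seller_type(raw: str) -> Optional[str]:
--     if not raw:
--         return None
--     s = raw.lower().strip()
--
--     if "cpo" in s or "certified" in s:
--         return "CPO"
--     if "auction" in s:
--         return "AUCTION"
--     if any(x in s for x in ["dealer", "dealership", "auto group", "motorcars", "motors"]):
--         return "DEALER"
--     if any(x in s for x in ["private", "owner", "individual", "personal"]):
--         return "PRIVATE"
--     return None
-- ===== SOURCE B (Python) =====
-- # B: one sweep over text positions collecting matched labels into a set, then a priority pass.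
-- KEYWORD_LABEL = [
--     ("cpo", "CPO"), ("certified", "CPO"),
--     ("auction", "AUCTION"),
--     ("dealer", "DEALER"), ("dealership", "DEALER"), ("auto group", "DEALER"),
--     ("motorcars", "DEALER"), ("motors", "DEALER"),
--     ("private", "PRIVATE"), ("owner", "PRIVATE"), ("individual", "PRIVATE"),
--     ("personal", "PRIVATE"),
-- ]
-- PRIORITY = ["CPO", "AUCTION", "DEALER", "PRIVATE"]
--
-- def normalize_seller_type(raw: str):
--     if not raw:
--         return None
--     s = raw.lower().strip()
--     found = set()
--     for i in range(len(s)):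
--         for kw, label in KEYWORD_LABEL:
--             if s[i:i + len(kw)] == kw:
--                 found.add(label)
--     for label in PRIORITY:
--         if label in found:
--             return label
--     return None
-- ===== Notes on version B (the rewrite author's own statement) =====
-- stated objective: alternative
-- what changed: Instead of testing each keyword with a substring search per branch, B makes one sweep over the text positions, collecting every label whose keyword starts at the current position into a set, and then resolves the label by a separate priority pass.
import Mathlib
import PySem

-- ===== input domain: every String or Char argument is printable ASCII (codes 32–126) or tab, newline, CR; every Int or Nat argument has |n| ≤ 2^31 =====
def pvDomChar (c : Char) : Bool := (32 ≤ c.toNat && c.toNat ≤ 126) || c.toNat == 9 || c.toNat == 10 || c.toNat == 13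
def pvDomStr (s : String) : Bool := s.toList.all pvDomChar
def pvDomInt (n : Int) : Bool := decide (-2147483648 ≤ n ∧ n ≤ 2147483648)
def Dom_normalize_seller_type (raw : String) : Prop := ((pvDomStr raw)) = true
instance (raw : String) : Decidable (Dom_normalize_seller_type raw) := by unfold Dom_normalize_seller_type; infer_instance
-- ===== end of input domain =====

-- B replaces A's per-keyword substring searches by one sweep over the text positions
-- collecting matched labels into a set, followed by a priority pass (alternative structure).

-- ===== PORT A =====
def normalize_seller_type (raw : String) : Option String :=
  if raw = "" then none
  else
    let s := PySem.Str.strip (PySem.Str.lower raw)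
    if PySem.Str.isIn "cpo" s || PySem.Str.isIn "certified" s then some "CPO"
    else if PySem.Str.isIn "auction" s then some "AUCTION"
    else if ["dealer", "dealership", "auto group", "motorcars", "motors"].any (fun x => PySem.Str.isIn x s) then some "DEALER"
    else if ["private", "owner", "individual", "personal"].any (fun x => PySem.Str.isIn x s) then some "PRIVATE"
    else none

-- ===== PORT B =====
def pvKeywordLabel : List (String × String) :=
  [ ("cpo", "CPO"), ("certified", "CPO"),
    ("auction", "AUCTION"),
    ("dealer", "DEALER"), ("dealership", "DEALER"), ("auto group", "DEALER"),
    ("motorcars", "DEALER"), ("motors", "DEALER"),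
    ("private", "PRIVATE"), ("owner", "PRIVATE"), ("individual", "PRIVATE"),
    ("personal", "PRIVATE") ]

def pvPriority : List String := ["CPO", "AUCTION", "DEALER", "PRIVATE"]

-- inner loop: at position i, try every (kw, label) pair; s[i:i+len(kw)] == kw
def pvScanAt (s : String) (found : PySem.Set String) (i : Int) : PySem.Set String :=
  pvKeywordLabel.foldl
    (fun f p =>
      if PySem.Str.slice s (some i) (some (i + (PySem.Str.len p.1 : Int))) = p.1
      then PySem.Set.add f p.2 else f)
    found

-- final loop: first label of the priority list present in found
def pvFirstIn (found : PySem.Set String) : List String → Option String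
  | [] => none
  | l :: rest => if PySem.Set.contains found l then some l else pvFirstIn found rest

def normalize_seller_type_alt (raw : String) : Option String :=
  if raw = "" then none
  else
    let s := PySem.Str.strip (PySem.Str.lower raw)
    let found := (PySem.List.pyRange 0 (PySem.Str.len s) 1).foldl (pvScanAt s) PySem.Set.empty
    pvFirstIn found pvPriority

-- ===== PRECONDITION & SPEC =====
def Spec_normalize_seller_type (raw : String) (out : Option String) : Prop := out = normalize_seller_type_alt raw
instance (raw : String) (out : Option String) : Decidable (Spec_normalize_seller_type raw out) := by unfold Spec_normalize_seller_type; infer_instance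

-- ===== CLAIM =====
def Claim_equal_normalize_seller_type : Prop := ∀ (raw : String), Dom_normalize_seller_type raw → Spec_normalize_seller_type raw (normalize_seller_type raw)

-- ===== LEMMAS AND PROOFS =====

-- membership in the inner (table) fold
theorem pv_mem_tableFold (s : String) (tbl : List (String × String)) (acc : PySem.Set String) (i : Int) (x : String) :
    x ∈ tbl.foldl
      (fun f p =>
        if PySem.Str.slice s (some i) (some (i + (PySem.Str.len p.1 : Int))) = p.1
        then PySem.Set.add f p.2 else f) acc
    ↔ x ∈ acc ∨ ∃ p ∈ tbl, PySem.Str.slice s (some i) (some (i + (PySem.Str.len p.1 : Int))) = p.1 ∧ p.2 = x := by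
  induction tbl generalizing acc with
  | nil => simp
  | cons p rest ih =>
      rw [List.foldl_cons]
      by_cases h : PySem.Str.slice s (some i) (some (i + (PySem.Str.len p.1 : Int))) = p.1
      · rw [if_pos h, ih]
        simp only [PySem.Set.mem_add, List.mem_cons]
        constructor
        · rintro (⟨hx | rfl⟩ | ⟨q, hq, hc⟩)
          · exact Or.inl hx
          · exact Or.inr ⟨p, Or.inl rfl, h, rfl⟩
          · exact Or.inr ⟨q, Or.inr hq, hc⟩
        · rintro (hx | ⟨q, hq | hq, hc⟩)
          · exact Or.inl (Or.inl hx)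
          · subst hq; exact Or.inl (Or.inr hc.2.symm)
          · exact Or.inr ⟨q, hq, hc⟩
      · rw [if_neg h, ih]
        simp only [List.mem_cons]
        constructor
        · rintro (hx | ⟨q, hq, hc⟩)
          · exact Or.inl hx
          · exact Or.inr ⟨q, Or.inr hq, hc⟩
        · rintro (hx | ⟨q, hq | hq, hc⟩)
          · exact Or.inl hx
          · subst hq; exact absurd hc.1 h
          · exact Or.inr ⟨q, hq, hc⟩

-- membership in the outer (position) fold
theorem pv_mem_posFold (s : String) (rng : List Int) (acc : PySem.Set String) (x : String) :
    x ∈ rng.foldl (pvScanAt s) acc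
    ↔ x ∈ acc ∨ ∃ i ∈ rng, ∃ p ∈ pvKeywordLabel,
        PySem.Str.slice s (some i) (some (i + (PySem.Str.len p.1 : Int))) = p.1 ∧ p.2 = x := by
  induction rng generalizing acc with
  | nil => simp
  | cons i rest ih =>
      simp only [List.foldl_cons, ih, pvScanAt, pv_mem_tableFold]
      constructor
      · rintro (⟨h | h⟩ | h)
        · exact Or.inl h
        · exact Or.inr ⟨i, by simp, h⟩
        · obtain ⟨j, hj, hp⟩ := h
          exact Or.inr ⟨j, by simp [hj], hp⟩
      · rintro (h | ⟨j, hj, hp⟩)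
        · exact Or.inl (Or.inl h)
        · rcases List.mem_cons.mp hj with rfl | hj'
          · exact Or.inl (Or.inr hp)
          · exact Or.inr ⟨j, hj', hp⟩

-- a position-wise match of kw anywhere in range(len s) is exactly 'kw in s'  (kw nonempty)
theorem pv_exists_slice_iff_isIn (s kw : String) (hkw : kw.toList ≠ []) :
    (∃ i ∈ PySem.List.pyRange 0 (PySem.Str.len s) 1,
        PySem.Str.slice s (some i) (some (i + (PySem.Str.len kw : Int))) = kw)
    ↔ PySem.Str.isIn kw s = true := by
  constructor
  · rintro ⟨i, hi, hsl⟩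
    rw [PySem.List.mem_pyRange_one] at hi
    obtain ⟨h0, hlt⟩ := hi
    lift i to ℕ using h0 with j
    have hdt : (s.toList.drop j).take kw.toList.length = kw.toList := by
      have := congrArg String.toList hsl
      simpa [PySem.Str.toList_slice, PySem.List.slice_natCast_add, PySem.Str.len] using this
    have hpref : kw.toList <+: s.toList.drop j := by
      rw [List.prefix_iff_eq_take]; exact hdt.symm
    rw [PySem.Str.isIn_eq]
    exact (PySem.Chars.exists_prefix_drop_iff_isIn _ _).mp ⟨j, hpref⟩
  · intro h
    rw [PySem.Str.isIn_eq] at h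
    obtain ⟨j, hpref⟩ := (PySem.Chars.exists_prefix_drop_iff_isIn _ _).mpr h
    have hjlt : j < s.toList.length := by
      by_contra hge
      rw [List.drop_eq_nil_of_le (by omega)] at hpref
      exact hkw (List.prefix_nil.mp hpref)
    refine ⟨(j : Int), ?_, ?_⟩
    · rw [PySem.List.mem_pyRange_one]
      constructor
      · exact_mod_cast Nat.zero_le j
      · simp [PySem.Str.len]; exact_mod_cast hjlt
    · apply String.toList_injective
      simp only [PySem.Str.toList_slice, PySem.Chars.slice_eq_listSlice, PySem.Str.len,
        PySem.Chars.len]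
      rw [PySem.List.slice_natCast_add]
      rw [List.prefix_iff_eq_take] at hpref
      exact hpref.symm

-- the found-set contains label L iff one of L's keywords occurs in s
theorem pv_contains_found (s : String) (L : String) :
    PySem.Set.contains
      ((PySem.List.pyRange 0 (PySem.Str.len s) 1).foldl (pvScanAt s) PySem.Set.empty) L = true
    ↔ ∃ p ∈ pvKeywordLabel, p.2 = L ∧ PySem.Str.isIn p.1 s = true := by
  rw [PySem.Set.contains_iff, pv_mem_posFold]
  simp only [PySem.Set.empty, List.not_mem_nil, false_or]
  constructor
  · rintro ⟨i, hi, p, hp, hsl, hL⟩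
    refine ⟨p, hp, hL, ?_⟩
    have hne : p.1.toList ≠ [] := by
      fin_cases hp <;> decide
    exact (pv_exists_slice_iff_isIn s p.1 hne).mp ⟨i, hi, hsl⟩
  · rintro ⟨p, hp, hL, hin⟩
    have hne : p.1.toList ≠ [] := by
      fin_cases hp <;> decide
    obtain ⟨i, hi, hsl⟩ := (pv_exists_slice_iff_isIn s p.1 hne).mpr hin
    exact ⟨i, hi, p, hp, hsl, hL⟩

-- the found-set's label L reads back as 'any of L's keywords occurs in s'
theorem pv_found_gen (s L : String) (kws : List String)
    (h1 : ∀ p ∈ pvKeywordLabel, p.2 = L → p.1 ∈ kws)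
    (h2 : ∀ x ∈ kws, (x, L) ∈ pvKeywordLabel) :
    PySem.Set.contains ((PySem.List.pyRange 0 (PySem.Str.len s) 1).foldl (pvScanAt s) PySem.Set.empty) L
      = kws.any (fun x => PySem.Str.isIn x s) := by
  rw [Bool.eq_iff_iff, pv_contains_found, List.any_eq_true]
  constructor
  · rintro ⟨p, hp, hL, hin⟩
    exact ⟨p.1, h1 p hp hL, hin⟩
  · rintro ⟨x, hx, hin⟩
    exact ⟨(x, L), h2 x hx, rfl, hin⟩

-- ===== VERDICT =====
theorem normalize_seller_type_spec : Claim_equal_normalize_seller_type := by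
  intro raw _
  unfold Spec_normalize_seller_type normalize_seller_type normalize_seller_type_alt
  by_cases h : raw = ""
  · simp [h]
  · simp only [h, if_false, pvPriority, pvFirstIn]
    generalize PySem.Str.strip (PySem.Str.lower raw) = s
    rw [pv_found_gen s "CPO" ["cpo", "certified"] (by decide) (by decide),
        pv_found_gen s "AUCTION" ["auction"] (by decide) (by decide),
        pv_found_gen s "DEALER" ["dealer", "dealership", "auto group", "motorcars", "motors"] (by decide) (by decide),
        pv_found_gen s "PRIVATE" ["private", "owner", "individual", "personal"] (by decide) (by decide)]
    simp only [List.any_cons, List.any_nil, Bool.or_false]
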